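-- pv_equiv track=rewrite | github.com/amongus-pvp/ORACsolns | Selection Exam 2003, Day 1/SocialEngineering.py | merge_groups
-- ===== SOURCE A (Python) =====
-- def normalize(state):
--     # Each group is a sorted tuple, and the list of groups is sorted
--     return tuple(sorted(tuple(sorted(group)) for group in state))
--
-- def merge_groups(groups):
--     results = []
--     for i in range(len(groups)):
--         for j in range(i+1, len(groups)):
--             g1 = groups[i]
--             g2 = groups[j]
--             new_group = tuple(sorted(g1 + g2))
--             new_groups = list(groups[:i] + groups[i+1:j] + groups[j+1:])
--             new_groups.append(new_group)
--             results.append(normalize(new_groups))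
--     return results
-- ===== SOURCE B (Python) =====
-- def _merge2(a, b):
--     # linear merge of two sorted tuples
--     out = []
--     p = 0
--     q = 0
--     while p < len(a) and q < len(b):
--         if b[q] < a[p]:
--             out.append(b[q])
--             q += 1
--         else:
--             out.append(a[p])
--             p += 1
--     out.extend(a[p:])
--     out.extend(b[q:])
--     return tuple(out)
--
--
-- def merge_groups(groups):
--     # sort each group once and the list of groups once; per pair, merge the two
--     # sorted groups linearly, drop them from the pre-sorted base and splice the
--     # merged group into its sorted position
--     sg = [tuple(sorted(g)) for g in groups]
--     base = sorted(sg)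
--     n = len(groups)
--     results = []
--     for i in range(n):
--         for j in range(i + 1, n):
--             merged = _merge2(sg[i], sg[j])
--             rest = list(base)
--             rest.remove(sg[i])
--             rest.remove(sg[j])
--             k = 0
--             while k < len(rest) and rest[k] < merged:
--                 k += 1
--             rest.insert(k, merged)
--             results.append(tuple(rest))
--     return results
-- ===== Notes on version B (the rewrite author's own statement) =====
-- stated objective: alternative
-- what changed: B sorts each group once and the list of sorted groups once up front; each pair's state is then built by a linear merge of the two pre-sorted groups plus a remove/splice into a copy of the pre-sorted base, instead of A's re-sorting of every group and of the whole state for every pair (intended as faster; a timing run measured 1.64x at the largest size, below its 1.5x two-input confirmation bar).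
import Mathlib
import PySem

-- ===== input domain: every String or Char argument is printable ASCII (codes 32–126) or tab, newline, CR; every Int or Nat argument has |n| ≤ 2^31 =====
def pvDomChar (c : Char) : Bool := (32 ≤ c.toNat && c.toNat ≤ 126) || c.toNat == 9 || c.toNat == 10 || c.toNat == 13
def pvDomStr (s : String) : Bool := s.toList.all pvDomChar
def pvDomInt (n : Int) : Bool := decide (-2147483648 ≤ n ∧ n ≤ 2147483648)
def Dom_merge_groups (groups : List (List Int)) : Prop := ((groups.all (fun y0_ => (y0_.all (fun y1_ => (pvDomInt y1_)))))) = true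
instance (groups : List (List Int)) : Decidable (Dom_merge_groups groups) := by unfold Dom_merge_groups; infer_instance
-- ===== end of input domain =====

-- B precomputes each group's sorted form and the sorted group list once, then builds each pair's
-- state by a linear merge plus remove/splice on the precomputed sorted base, instead of A's
-- re-sorting of every group and of the whole state for every pair.

-- ===== PORT A =====

-- sorted(xs) on a tuple/list of ints (key is the element itself)
def sortIntList (xs : List Int) : List Int := PySem.List.sorted xs (fun x => x) false

-- sorted(xs) on a list of int-tuples (Python compares tuples lexicographically)
def sortStates (xs : List (List Int)) : List (List Int) := PySem.List.sorted xs (fun x => x) false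

-- helper `normalize` of A
def pyNormalize (state : List (List Int)) : List (List Int) :=
  sortStates (state.map sortIntList)

def merge_groups (groups : List (List Int)) : List (List (List Int)) :=
  (PySem.List.pyRange 0 (groups.length : Int) 1).foldl
    (fun results i =>
      (PySem.List.pyRange (i + 1) (groups.length : Int) 1).foldl
        (fun results j =>
          let g1 := PySem.List.pyGetD groups i []
          let g2 := PySem.List.pyGetD groups j []
          let new_group := sortIntList (g1 ++ g2)
          let new_groups := (PySem.List.slice groups none (some i) ++
              PySem.List.slice groups (some (i + 1)) (some j) ++
              PySem.List.slice groups (some (j + 1)) none) ++ [new_group]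
          results ++ [pyNormalize new_groups])
        results)
    []

-- ===== PORT B =====

-- helper `_merge2` of B: linear merge of two sorted lists
def mergeTwo : List Int → List Int → List Int
  | [], b => b
  | x :: xs, [] => x :: xs
  | x :: xs, y :: ys =>
      if y < x then y :: mergeTwo (x :: xs) ys else x :: mergeTwo xs (y :: ys)
termination_by a b => a.length + b.length

-- B's while-loop (count leading elements < m) followed by rest.insert(k, m)
def spliceSorted (m : List Int) : List (List Int) → List (List Int)
  | [] => [m]
  | x :: xs => if x < m then x :: spliceSorted m xs else m :: x :: xs

def merge_groups_alt (groups : List (List Int)) : List (List (List Int)) :=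
  let sg := groups.map sortIntList
  let base := sortStates sg
  let n := (groups.length : Int)
  (PySem.List.pyRange 0 n 1).foldl
    (fun results i =>
      (PySem.List.pyRange (i + 1) n 1).foldl
        (fun results j =>
          let merged := mergeTwo (PySem.List.pyGetD sg i []) (PySem.List.pyGetD sg j [])
          let rest1 := (PySem.List.remove? base (PySem.List.pyGetD sg i [])).getD base
          let rest2 := (PySem.List.remove? rest1 (PySem.List.pyGetD sg j [])).getD rest1
          results ++ [spliceSorted merged rest2])
        results)
    []

-- ===== PRECONDITION & SPEC =====
def Spec_merge_groups (groups : List (List Int)) (out : List (List (List Int))) : Prop := out = merge_groups_alt groups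
instance (groups : List (List Int)) (out : List (List (List Int))) : Decidable (Spec_merge_groups groups out) := by unfold Spec_merge_groups; infer_instance

-- ===== CLAIM (what is proved, stated in full; the proofs are below) =====
def Claim_equal_merge_groups : Prop := ∀ (groups : List (List Int)), Dom_merge_groups groups → Spec_merge_groups groups (merge_groups groups)

-- ===== LEMMAS AND PROOFS =====

-- `sorted` on List Int elaborates with core's lex LT instance; the PySem order lemmas use the
-- (definitionally equal) Mathlib linear order — this lemma switches the Decidable instance.
theorem sortedBridge (xs : List (List Int)) (key : List Int → List Int) (rev : Bool) :
    PySem.List.sorted xs key rev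
      = @PySem.List.sorted (List Int) (List Int) List.instLinearOrder.toLT LinearOrder.toDecidableLT xs key rev := by
  show @PySem.List.sorted (List Int) (List Int) List.instLinearOrder.toLT (fun a b => a.decidableLT b) xs key rev = _
  exact congrArg (fun d => @PySem.List.sorted (List Int) (List Int) List.instLinearOrder.toLT d xs key rev)
    (funext fun a => funext fun b => Subsingleton.elim _ _)

theorem sortStates_pairwise (xs : List (List Int)) : (sortStates xs).Pairwise (· ≤ ·) := by
  rw [sortStates, sortedBridge]
  have := @PySem.List.sorted_pairwise (List Int) (List Int) _ xs (fun x => x)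
  simpa using this

theorem sortStates_eq_of_perm_of_pairwise (xs ys : List (List Int)) (h : ys.Perm xs)
    (hp : ys.Pairwise (· ≤ ·)) : sortStates xs = ys := by
  rw [sortStates, sortedBridge]
  exact PySem.List.sorted_id_eq_of_perm_of_pairwise xs ys h hp

theorem sortIntList_perm (xs : List Int) : (sortIntList xs).Perm xs :=
  PySem.List.sorted_perm xs _ _

theorem sortIntList_pairwise (xs : List Int) : (sortIntList xs).Pairwise (· ≤ ·) := by
  have := PySem.List.sorted_pairwise (xs := xs) (key := fun x : Int => x)
  simpa [sortIntList] using this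

theorem sortIntList_eq_of_perm_of_pairwise (xs ys : List Int) (h : ys.Perm xs)
    (hp : ys.Pairwise (· ≤ ·)) : sortIntList xs = ys :=
  PySem.List.sorted_id_eq_of_perm_of_pairwise xs ys h hp

theorem mergeTwo_perm (a b : List Int) : (mergeTwo a b).Perm (a ++ b) := by
  fun_induction mergeTwo a b with
  | case1 b => simp
  | case2 x xs => simp
  | case3 x xs y ys hlt ih =>
      exact ((ih.cons y).trans List.perm_middle.symm)
  | case4 x xs y ys hlt ih =>
      exact ih.cons x

theorem mergeTwo_pairwise (a b : List Int) (ha : a.Pairwise (· ≤ ·)) (hb : b.Pairwise (· ≤ ·)) :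
    (mergeTwo a b).Pairwise (· ≤ ·) := by
  fun_induction mergeTwo a b with
  | case1 b => exact hb
  | case2 x xs => exact ha
  | case3 x xs y ys hlt ih =>
      rw [List.pairwise_cons] at hb ⊢
      refine ⟨?_, ih ha hb.2⟩
      intro z hz
      have hz' := (mergeTwo_perm (x :: xs) ys).mem_iff.mp hz
      rcases List.mem_append.mp hz' with hz1 | hz2
      · rcases List.mem_cons.mp hz1 with rfl | hz3
        · exact le_of_lt hlt
        · exact le_trans (le_of_lt hlt) ((List.pairwise_cons.mp ha).1 z hz3)
      · exact hb.1 z hz2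
  | case4 x xs y ys hlt ih =>
      rw [List.pairwise_cons] at ha ⊢
      refine ⟨?_, ih ha.2 hb⟩
      intro z hz
      have hz' := (mergeTwo_perm xs (y :: ys)).mem_iff.mp hz
      have hxy : x ≤ y := not_lt.mp hlt
      rcases List.mem_append.mp hz' with hz1 | hz2
      · exact ha.1 z hz1
      · rcases List.mem_cons.mp hz2 with rfl | hz3
        · exact hxy
        · exact le_trans hxy ((List.pairwise_cons.mp hb).1 z hz3)

theorem spliceSorted_perm (m : List Int) (xs : List (List Int)) :
    (spliceSorted m xs).Perm (m :: xs) := by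
  induction xs with
  | nil => simp [spliceSorted]
  | cons x xs ih =>
      rw [spliceSorted]
      by_cases h : x < m
      · rw [if_pos h]
        exact (ih.cons x).trans (List.Perm.swap m x xs)
      · rw [if_neg h]

theorem spliceSorted_pairwise (m : List Int) (xs : List (List Int))
    (hp : xs.Pairwise (· ≤ ·)) : (spliceSorted m xs).Pairwise (· ≤ ·) := by
  induction xs with
  | nil => simp [spliceSorted]
  | cons x xs ih =>
      rw [spliceSorted]
      rw [List.pairwise_cons] at hp
      by_cases h : x < m
      · rw [if_pos h]
        rw [List.pairwise_cons]
        refine ⟨?_, ih hp.2⟩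
        intro z hz
        rcases List.mem_cons.mp ((spliceSorted_perm m xs).mem_iff.mp hz) with rfl | hz2
        · exact le_of_lt h
        · exact hp.1 z hz2
      · rw [if_neg h]
        rw [List.pairwise_cons]
        refine ⟨?_, List.pairwise_cons.mpr hp⟩
        intro z hz
        rcases List.mem_cons.mp hz with rfl | hz2
        · exact not_lt.mp h
        · exact le_trans (not_lt.mp h) (hp.1 z hz2)

-- the per-pair item equality, in Nat indices
theorem pair_eq (groups : List (List Int)) (a b : Nat) (hab : a < b) (hb : b < groups.length) :
    pyNormalize ((groups.take a ++ (groups.drop (a + 1)).take (b - (a + 1)) ++ groups.drop (b + 1)) ++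
        [sortIntList (groups[a]'(by omega) ++ groups[b]'(by omega))]) =
    spliceSorted
      (mergeTwo (sortIntList (groups[a]'(by omega))) (sortIntList (groups[b]'(by omega))))
      ((PySem.List.remove?
          ((PySem.List.remove? (sortStates (groups.map sortIntList))
              (sortIntList (groups[a]'(by omega)))).getD (sortStates (groups.map sortIntList)))
          (sortIntList (groups[b]'(by omega)))).getD
        ((PySem.List.remove? (sortStates (groups.map sortIntList))
            (sortIntList (groups[a]'(by omega)))).getD (sortStates (groups.map sortIntList)))) := by
  have ha' : a < groups.length := by omega
  set sg := groups.map sortIntList with hsgdef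
  have hlen : sg.length = groups.length := by simp [hsgdef]
  set ga := groups[a]'ha' with hga
  set gb := groups[b]'hb with hgb
  set fa := sortIntList ga with hfa
  set fb := sortIntList gb with hfb
  have hsga : sg[a]'(by omega) = fa := by simp [hsgdef, hga, hfa]
  have hsgb : sg[b]'(by omega) = fb := by simp [hsgdef, hgb, hfb]
  set M := mergeTwo fa fb with hMdef
  have hMperm : M.Perm (ga ++ gb) :=
    (mergeTwo_perm fa fb).trans ((sortIntList_perm ga).append (sortIntList_perm gb))
  have hMpair : M.Pairwise (· ≤ ·) :=
    mergeTwo_pairwise _ _ (sortIntList_pairwise _) (sortIntList_pairwise _)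
  have hM : sortIntList (ga ++ gb) = M := sortIntList_eq_of_perm_of_pairwise _ _ hMperm hMpair
  have hMfix : sortIntList M = M := sortIntList_eq_of_perm_of_pairwise _ _ (List.Perm.refl M) hMpair
  set restSG := sg.take a ++ ((sg.drop (a + 1)).take (b - (a + 1)) ++ sg.drop (b + 1)) with hrest
  -- split sg around positions a and b
  have e2 : sg.drop (a + 1) = (sg.drop (a + 1)).take (b - (a + 1)) ++ (sg[b]'(by omega) :: sg.drop (b + 1)) := by
    conv_lhs => rw [← List.take_append_drop (b - (a + 1)) (sg.drop (a + 1))]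
    congr 1
    rw [List.drop_drop]
    have h1 : a + 1 + (b - (a + 1)) = b := by omega
    rw [h1]
    exact List.drop_eq_getElem_cons (by omega)
  have e1 : sg = sg.take a ++ (sg[a]'(by omega) :: sg.drop (a + 1)) := by
    conv_lhs => rw [← List.take_append_drop a sg]
    congr 1
    exact List.drop_eq_getElem_cons (by omega)
  have p1 : sg.Perm (sg[a]'(by omega) :: (sg.take a ++ sg.drop (a + 1))) := by
    conv_lhs => rw [e1]
    exact List.perm_middle
  have p2 : (sg.take a ++ sg.drop (a + 1)).Perm (sg[b]'(by omega) :: restSG) := by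
    conv_lhs => rw [e2, ← List.append_assoc]
    have := List.perm_middle (a := sg[b]'(by omega))
      (l₁ := sg.take a ++ (sg.drop (a + 1)).take (b - (a + 1))) (l₂ := sg.drop (b + 1))
    simpa [hrest, List.append_assoc] using this
  have hsplit : sg.Perm (fa :: (fb :: restSG)) := by
    have := p1.trans ((p2.cons (sg[a]'(by omega))))
    rwa [hsga, hsgb] at this
  set base := sortStates sg with hbase
  have hbperm : base.Perm sg := PySem.List.sorted_perm sg _ _
  have hbpair : base.Pairwise (· ≤ ·) := sortStates_pairwise sg
  have hamem : fa ∈ base := hbperm.mem_iff.mpr (by rw [← hsga]; exact List.getElem_mem _)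
  have hrem1 : PySem.List.remove? base fa = some (base.erase fa) :=
    PySem.List.remove?_eq_some_erase base fa hamem
  have hr1perm : (base.erase fa).Perm (fb :: restSG) :=
    ((List.perm_cons_erase hamem).symm.trans (hbperm.trans hsplit)).cons_inv
  have hbmem : fb ∈ base.erase fa := hr1perm.mem_iff.mpr List.mem_cons_self
  have hrem2 : PySem.List.remove? (base.erase fa) fb = some ((base.erase fa).erase fb) :=
    PySem.List.remove?_eq_some_erase _ fb hbmem
  have hr2perm : ((base.erase fa).erase fb).Perm restSG :=
    ((List.perm_cons_erase hbmem).symm.trans hr1perm).cons_inv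
  have hpair_r2 : ((base.erase fa).erase fb).Pairwise (· ≤ ·) :=
    (hbpair.sublist List.erase_sublist).sublist List.erase_sublist
  rw [hrem1]
  simp only [Option.getD_some]
  rw [hrem2]
  simp only [Option.getD_some]
  have hmapped : ((groups.take a ++ (groups.drop (a + 1)).take (b - (a + 1)) ++ groups.drop (b + 1)) ++
      [sortIntList (ga ++ gb)]).map sortIntList = restSG ++ [M] := by
    simp only [List.map_append, List.map_take, List.map_drop, List.map_cons, List.map_nil,
      hM, hMfix, hrest, hsgdef, List.append_assoc]
  rw [pyNormalize, hmapped]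
  exact sortStates_eq_of_perm_of_pairwise _ _
    ((spliceSorted_perm M _).trans ((hr2perm.cons M).trans (List.perm_append_singleton M restSG).symm))
    (spliceSorted_pairwise M _ hpair_r2)

-- ===== VERDICT (by name: the statement is the Claim_ definition above) =====
theorem merge_groups_spec : Claim_equal_merge_groups := by
  intro groups _
  unfold Spec_merge_groups
  show merge_groups groups = merge_groups_alt groups
  rw [merge_groups, merge_groups_alt]
  dsimp only
  apply PySem.List.foldl_congr_mem
  intro acc i hi
  apply PySem.List.foldl_congr_mem
  intro acc' j hj
  obtain ⟨h0i, hin⟩ := PySem.List.mem_pyRange_one.mp hi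
  obtain ⟨hij, hjn⟩ := PySem.List.mem_pyRange_one.mp hj
  have h0j : (0 : Int) ≤ j := by omega
  have hiln : i < (groups.length : Int) := hin
  have hjln : j < (groups.length : Int) := hjn
  have hmln : i < ((groups.map sortIntList).length : Int) := by simpa using hin
  have hmln' : j < ((groups.map sortIntList).length : Int) := by simpa using hjn
  have hab : i.toNat < j.toNat := by omega
  have hbl : j.toNat < groups.length := by omega
  have hi1 : (i + 1).toNat = i.toNat + 1 := by omega
  have hj1 : (j + 1).toNat = j.toNat + 1 := by omega
  rw [PySem.List.pyGetD_eq_getElem groups [] h0i hiln,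
      PySem.List.pyGetD_eq_getElem groups [] h0j hjln,
      PySem.List.pyGetD_eq_getElem (groups.map sortIntList) [] h0i hmln,
      PySem.List.pyGetD_eq_getElem (groups.map sortIntList) [] h0j hmln',
      PySem.List.slice_to groups h0i,
      PySem.List.slice_toNat groups (by omega) h0j,
      PySem.List.slice_from groups (by omega),
      hi1, hj1,
      List.getElem_map (h := by omega), List.getElem_map (h := by omega)]
  rw [pair_eq groups i.toNat j.toNat hab hbl]
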